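-- pv_equiv track=rewrite | github.com/francois-finance/AgroTrade-Platform | module_9_news/processors/llm_analyzer.py | _filter_relevant_text
-- ===== SOURCE A (Python) =====
-- GRAIN_KEYWORDS = [
--     # Wheat
--     "wheat", "blé", "ble", "trigo", "пшеница", "пшениця", "小麦",
--     # Corn
--     "corn", "maïs", "mais", "maiz", "milho", "кукуруза", "玉米",
--     # Soy
--     "soy", "soja", "soybean", "soybeans", "大豆",
--     # General
--     "grain", "grains", "céréale", "cereal", "зерно",
--     # Agri
--     "harvest", "récolte", "cosecha", "colheita",
--     "yield", "rendement", "crop",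
--     "drought", "sécheresse", "sequia", "seca",
--     "export", "import", "stocks", "supply", "oferta",
--     "freight", "fret", "shipping", "corridor",
--     "WASDE", "USDA", "FAO", "futures", "CBOT",
--     "tariff", "embargo", "sanction",
--     "El Niño", "La Niña", "ENSO",
-- ]
--
-- def _filter_relevant_text(text: str, max_chars: int = 4000) -> str:
--     """
--     Garde les paragraphes contenant des mots-clés agri.
--     Si rien trouvé, retourne le début du texte.
--     """
--     if not text:
--         return ""
--
--     paragraphs = [p.strip() for p in text.replace("\n", " ").split(". ") if p.strip()]
--     selected = []
--
--     for p in paragraphs: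
--         if any(kw.lower() in p.lower() for kw in GRAIN_KEYWORDS):
--             selected.append(p)
--
--     if selected:
--         return ". ".join(selected)[:max_chars]
--
--     return text[:max_chars]
-- ===== SOURCE B (Python) =====
-- GRAIN_KEYWORDS = [
--     # Wheat
--     "wheat", "blé", "ble", "trigo", "пшеница", "пшениця", "小麦",
--     # Corn
--     "corn", "maïs", "mais", "maiz", "milho", "кукуруза", "玉米",
--     # Soy
--     "soy", "soja", "soybean", "soybeans", "大豆",
--     # General
--     "grain", "grains", "céréale", "cereal", "зерно",
--     # Agri
--     "harvest", "récolte", "cosecha", "colheita",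
--     "yield", "rendement", "crop",
--     "drought", "sécheresse", "sequia", "seca",
--     "export", "import", "stocks", "supply", "oferta",
--     "freight", "fret", "shipping", "corridor",
--     "WASDE", "USDA", "FAO", "futures", "CBOT",
--     "tariff", "embargo", "sanction",
--     "El Niño", "La Niña", "ENSO",
-- ]
--
-- # multi-pattern index built once: first character -> the lowercased keywords starting with it
-- _INDEX = {}
-- for _kw in GRAIN_KEYWORDS:
--     _k = _kw.lower()
--     _INDEX.setdefault(_k[0], []).append(_k)
--
--
-- def _has_keyword(p):
--     # one left-to-right scan of the paragraph; at each position only the bucket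
--     # of keywords sharing that first character is tried
--     lp = p.lower()
--     return any(
--         lp.startswith(kw, i)
--         for i, c in enumerate(lp)
--         for kw in _INDEX.get(c, ())
--     )
--
--
-- def _filter_relevant_text(text: str, max_chars: int = 4000) -> str:
--     if not text:
--         return ""
--     selected = []
--     for chunk in text.replace("\n", " ").split(". "):
--         p = chunk.strip()
--         if p and _has_keyword(p):
--             selected.append(p)
--     return (". ".join(selected) if selected else text)[:max_chars]
-- ===== Notes on version B (the rewrite author's own statement) =====
-- stated objective: alternative
-- what changed: A tests each paragraph with ~55 independent substring scans; B builds a first-character bucket index of the lowercased keywords once at module load and makes one left-to-right scan per paragraph, trying at each position only the bucket of keywords starting with that character, and fuses A's strip/filter/select stages into a single pass with one final truncation.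
import Mathlib
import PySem

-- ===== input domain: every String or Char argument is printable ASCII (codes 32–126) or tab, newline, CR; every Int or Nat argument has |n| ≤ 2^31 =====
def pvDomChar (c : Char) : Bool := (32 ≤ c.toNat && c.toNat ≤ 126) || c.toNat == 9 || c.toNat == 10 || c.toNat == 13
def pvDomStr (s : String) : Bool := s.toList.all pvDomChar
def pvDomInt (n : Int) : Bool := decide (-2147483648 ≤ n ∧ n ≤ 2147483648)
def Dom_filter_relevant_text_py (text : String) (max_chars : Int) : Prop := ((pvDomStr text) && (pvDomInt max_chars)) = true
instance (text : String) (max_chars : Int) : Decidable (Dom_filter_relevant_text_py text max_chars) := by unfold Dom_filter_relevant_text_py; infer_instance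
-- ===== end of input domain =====

-- B replaces A's per-paragraph loop over ~60 substring tests by a first-character bucket index
-- (built once) scanned left-to-right over each paragraph, and fuses strip/filter/select into one
-- pass with a single final truncation (objective: alternative).

-- ===== PORT A =====
def grainKeywords : List String := ["wheat", "blé", "ble", "trigo", "пшеница", "пшениця", "小麦", "corn", "maïs", "mais", "maiz", "milho", "кукуруза", "玉米", "soy", "soja", "soybean", "soybeans", "大豆", "grain", "grains", "céréale", "cereal", "зерно", "harvest", "récolte", "cosecha", "colheita", "yield", "rendement", "crop", "drought", "sécheresse", "sequia", "seca", "export", "import", "stocks", "supply", "oferta", "freight", "fret", "shipping", "corridor", "WASDE", "USDA", "FAO", "futures", "CBOT", "tariff", "embargo", "sanction", "El Niño", "La Niña", "ENSO"]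

def filter_relevant_text_py (text : String) (max_chars : Int) : String :=
  if text = "" then ""
  else
    let paragraphs := (((PySem.Str.split? (PySem.Str.replace text "\n" " ") ". ").getD []).map PySem.Str.strip).filter (· != "")
    let selected := paragraphs.foldl (fun acc p =>
      if grainKeywords.any (fun kw => PySem.Str.isIn (PySem.Str.lower kw) (PySem.Str.lower p)) then acc ++ [p] else acc) []
    if selected ≠ [] then PySem.Str.slice (PySem.Str.join ". " selected) none (some max_chars)
    else PySem.Str.slice text none (some max_chars)

-- ===== PORT B =====
-- the module-level index loop: for kw in GRAIN_KEYWORDS: k = kw.lower(); _INDEX.setdefault(k[0], []).append(k)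
-- (the per-iteration pair (k[0], k) is materialised first so the fold is the setdefault/append loop verbatim;
--  k[0] is k.headD ' ' — every keyword is nonempty, so the default is never read)
def kwPairs : List (Char × List Char) :=
  grainKeywords.map (fun kw =>
    let k := PySem.Chars.lower kw.toList
    (k.headD ' ', k))

def kwIndex : PySem.Dict Char (List (List Char)) :=
  kwPairs.foldl (fun d pr => d.modify pr.1 [] (· ++ [pr.2])) PySem.Dict.empty

-- _has_keyword: one scan of the lowered paragraph; lp.startswith(kw, i) is kw.isPrefixOf (lp.drop i)
def hasKeyword (p : String) : Bool :=
  let lp := (PySem.Str.lower p).toList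
  (PySem.List.enumerate lp 0).any (fun ic =>
    (kwIndex.getD ic.2 []).any (fun kw => kw.isPrefixOf (lp.drop ic.1.toNat)))

def filter_relevant_text_py_alt (text : String) (max_chars : Int) : String :=
  if text = "" then ""
  else
    let selected := ((PySem.Str.split? (PySem.Str.replace text "\n" " ") ". ").getD []).foldl
      (fun acc chunk =>
        let p := PySem.Str.strip chunk
        if (p != "" && hasKeyword p) then acc ++ [p] else acc) []
    PySem.Str.slice (if selected ≠ [] then PySem.Str.join ". " selected else text) none (some max_chars)

-- ===== PRECONDITION & SPEC =====
def Spec_filter_relevant_text_py (text : String) (max_chars : Int) (out : String) : Prop := out = filter_relevant_text_py_alt text max_chars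
instance (text : String) (max_chars : Int) (out : String) : Decidable (Spec_filter_relevant_text_py text max_chars out) := by unfold Spec_filter_relevant_text_py; infer_instance

-- ===== CLAIM =====
def Claim_equal_filter_relevant_text_py : Prop := ∀ (text : String) (max_chars : Int), Dom_filter_relevant_text_py text max_chars → Spec_filter_relevant_text_py text max_chars (filter_relevant_text_py text max_chars)

-- ===== LEMMAS AND PROOFS =====

-- the bucket of c holds exactly the lowered keywords whose recorded first char is c, in order
lemma kwIndex_getD (c : Char) :
    kwIndex.getD c [] = (kwPairs.filter (fun pr => pr.1 == c)).map (·.2) := by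
  unfold kwIndex
  rw [PySem.Dict.getD_foldl_modify_append]
  simp [PySem.Dict.getD_empty]

lemma kwPairs_shape : ∀ pr ∈ kwPairs, pr.2 ≠ [] ∧ pr.1 = pr.2.headD ' ' := by
  decide

-- per paragraph: B's indexed position scan equals A's any-keyword substring test
lemma pred_eq (p : String) :
    hasKeyword p
      = grainKeywords.any (fun kw => PySem.Str.isIn (PySem.Str.lower kw) (PySem.Str.lower p)) := by
  have hrhs : grainKeywords.any (fun kw => PySem.Str.isIn (PySem.Str.lower kw) (PySem.Str.lower p))
      = kwPairs.any (fun pr => PySem.Chars.isIn pr.2 (PySem.Str.lower p).toList) := by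
    unfold kwPairs
    rw [List.any_map]
    apply PySem.List.any_congr_mem
    intro kw _
    simp [PySem.Str.isIn, PySem.Str.toList_lower]
  rw [hrhs]
  set lp := (PySem.Str.lower p).toList with hlp
  have hiff : (hasKeyword p = true) ↔ (kwPairs.any (fun pr => PySem.Chars.isIn pr.2 lp) = true) := by
    unfold hasKeyword
    rw [← hlp]
    simp only [List.any_eq_true, PySem.List.mem_enumerate_iff, kwIndex_getD, List.mem_map,
      List.mem_filter, List.isPrefixOf_iff_prefix]
    constructor
    · rintro ⟨ic, ⟨k, hk, rfl⟩, kw, ⟨pr, ⟨hmem, -⟩, rfl⟩, hpre⟩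
      exact ⟨pr, hmem, (PySem.Chars.exists_prefix_drop_iff_isIn pr.2 lp).mp
        ⟨((0 : Int) + (k : Int)).toNat, hpre⟩⟩
    · rintro ⟨pr, hmem, hin⟩
      obtain ⟨hne, hhead⟩ := kwPairs_shape pr hmem
      obtain ⟨j, hpre⟩ := (PySem.Chars.exists_prefix_drop_iff_isIn pr.2 lp).mpr hin
      obtain ⟨c, rest, hcr⟩ := List.exists_cons_of_ne_nil hne
      obtain ⟨t, ht⟩ := hpre
      have hjlt : j < lp.length := by
        by_contra hcon
        have hnil : lp.drop j = [] := List.drop_eq_nil_of_le (by omega)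
        rw [hnil] at ht
        exact hne (by cases pr.2 <;> simp_all)
      have hc : lp[j] = c := by
        have h1 : (lp.drop j).head? = some c := by rw [← ht, hcr]; simp
        rw [List.head?_drop] at h1
        have h2 := List.getElem?_eq_getElem (l := lp) (i := j) hjlt
        rw [h2] at h1
        simpa using h1
      refine ⟨((0 : Int) + (j : Int), lp[j]), ⟨j, hjlt, rfl⟩, pr.2, ⟨pr, ⟨hmem, ?_⟩, rfl⟩, ?_⟩
      · simp [hhead, hcr, hc]
      · have hnt : ((0 : Int) + (j : Int), lp[j]).1.toNat = j := by simp
        rw [hnt]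
        exact ⟨t, ht⟩
  cases hb : kwPairs.any (fun pr => PySem.Chars.isIn pr.2 lp) with
  | true => exact hiff.mpr hb
  | false =>
    cases hr : hasKeyword p with
    | false => rfl
    | true => rw [hb] at hiff; exact absurd (hiff.mp hr) (by simp)

-- one fused strip/test/append pass over the chunks equals A's staged map/filter then select
lemma sel_eq (chunks : List String) (q r : String → Bool) (hqr : ∀ p, r p = q p) :
    ((chunks.map PySem.Str.strip).filter (· != "")).foldl
      (fun acc p => if q p then acc ++ [p] else acc) []
    = chunks.foldl
        (fun acc chunk =>
          let p := PySem.Str.strip chunk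
          if (p != "" && r p) then acc ++ [p] else acc) [] := by
  rw [PySem.List.foldl_append_if_eq_filter, List.nil_append, List.filter_filter]
  have hB := PySem.List.foldl_append_if
    (l := chunks)
    (p := fun chunk => (PySem.Str.strip chunk != "" && r (PySem.Str.strip chunk)))
    (f := PySem.Str.strip) (acc := ([] : List String))
  rw [List.nil_append] at hB
  rw [hB, List.filter_map]
  congr 1
  apply List.filter_congr
  intro x _
  simp only [Function.comp]
  rw [hqr]
  exact Bool.and_comm _ _

-- ===== VERDICT =====
theorem filter_relevant_text_py_spec : Claim_equal_filter_relevant_text_py := by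
  intro text max_chars _
  unfold Spec_filter_relevant_text_py filter_relevant_text_py filter_relevant_text_py_alt
  by_cases h : text = ""
  · simp [h]
  · simp only [if_neg h]
    rw [sel_eq _ _ hasKeyword pred_eq,
      apply_ite (fun s => PySem.Str.slice s none (some max_chars))]
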